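-- pv_equiv track=rewrite | github.com/Shuai-Xie/LeetCode | company/tc2/1.py | longest_subarr
-- ===== SOURCE A (Python) =====
-- def longest_subarr(arr):
--     n = len(arr)
--     dp = [1] * n
--
--     for i in range(1, n):
--         for j in range(i - 1, -1, -1):
--             if arr[j] < arr[i]:
--                 dp[i] = dp[j] + 1
--                 break
--     return max(dp)
-- ===== SOURCE B (Python) =====
-- def longest_subarr(arr):
--     # Monotonic stack: one pass; for each x the nearest previous strictly
--     # smaller element's chain length sits on top after popping >= x.
--     best = 0
--     stack = []  # (value, chain); values strictly increasing bottom -> top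
--     for x in arr:
--         while stack and stack[-1][0] >= x:
--             stack.pop()
--         chain = stack[-1][1] + 1 if stack else 1
--         stack.append((x, chain))
--         if chain > best:
--             best = chain
--     return best
-- ===== Notes on version B (the rewrite author's own statement) =====
-- stated objective: faster
-- what changed: Replaces the O(n^2) backwards scan for the nearest previous smaller element by a monotonic increasing stack carrying (value, chain) pairs, computing all chain lengths and the running maximum in one pass.
import Mathlib
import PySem

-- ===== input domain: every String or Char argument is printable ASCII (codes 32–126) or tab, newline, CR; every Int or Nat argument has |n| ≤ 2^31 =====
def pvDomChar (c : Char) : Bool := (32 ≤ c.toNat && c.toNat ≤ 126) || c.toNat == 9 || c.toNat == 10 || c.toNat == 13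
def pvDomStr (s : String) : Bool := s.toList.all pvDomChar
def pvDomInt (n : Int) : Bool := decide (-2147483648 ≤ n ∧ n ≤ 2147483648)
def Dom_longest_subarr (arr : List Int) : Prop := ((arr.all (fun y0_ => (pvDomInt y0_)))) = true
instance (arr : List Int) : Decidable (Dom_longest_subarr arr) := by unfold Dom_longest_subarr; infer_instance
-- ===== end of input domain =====

-- B replaces A's O(n^2) backwards scan by a one-pass monotonic stack (objective: faster, asymptotic).

-- ===== PORT A =====
-- inner loop `for j in range(i-1,-1,-1): if arr[j] < arr[i]: dp[i] = dp[j]+1; break`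
-- (indices are always in range here, so pyGetD/pySetD are exact)
def pvInnerA (arr : List Int) (i : Int) (dp : List Int) : List Int → List Int
  | [] => dp
  | j :: js =>
    if PySem.List.pyGetD arr j 0 < PySem.List.pyGetD arr i 0 then
      PySem.List.pySetD dp i (PySem.List.pyGetD dp j 0 + 1)
    else pvInnerA arr i dp js

def longest_subarr (arr : List Int) : Int :=
  let n : Int := PySem.List.len arr
  let dp : List Int := List.replicate arr.length (1 : Int)
  let dp := (PySem.List.pyRange 1 n 1).foldl
      (fun dp i => pvInnerA arr i dp (PySem.List.pyRange (i - 1) (-1) (-1))) dp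
  match PySem.List.max? dp (fun y => y) with
  | some m => m
  | none => 0  -- unreachable under Pre_: Python's max([]) raises ValueError

-- ===== PORT B =====
-- loop body of Source B; the stack is kept top-first, so append/pop-at-the-end = cons/dropWhile at the head
def pvStepB (st : Int × List (Int × Int)) (x : Int) : Int × List (Int × Int) :=
  let s := st.2.dropWhile (fun p => decide (x ≤ p.1))
  let chain : Int := match s with | [] => 1 | p :: _ => p.2 + 1
  (if st.1 < chain then chain else st.1, (x, chain) :: s)

def longest_subarr_alt (arr : List Int) : Int :=
  (arr.foldl pvStepB (0, [])).1

-- ===== PRECONDITION & SPEC =====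
-- Pre_ excludes only the empty list, on which A raises ValueError (max of an empty sequence).
def Pre_longest_subarr (arr : List Int) : Prop := arr ≠ []
instance (arr : List Int) : Decidable (Pre_longest_subarr arr) := by unfold Pre_longest_subarr; infer_instance
def pvWitness_longest_subarr : List Int := [1, 2, 1]

def Spec_longest_subarr (arr : List Int) (out : Int) : Prop := out = longest_subarr_alt arr
instance (arr : List Int) (out : Int) : Decidable (Spec_longest_subarr arr out) := by unfold Spec_longest_subarr; infer_instance

-- ===== CLAIM (what is proved, stated in full; the proofs are below) =====
def Claim_equal_longest_subarr : Prop := ∀ (arr : List Int), Dom_longest_subarr arr → Pre_longest_subarr arr → Spec_longest_subarr arr (longest_subarr arr)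

-- ===== LEMMAS AND PROOFS =====

-- the common specification layer: chain value of the next element given the
-- reversed history `rev` of (value, chain) pairs (most recent first)
def pvStep (rev : List (Int × Int)) (x : Int) : Int :=
  match rev.find? (fun p => decide (p.1 < x)) with
  | some p => p.2 + 1
  | none => 1

-- reversed history after processing xs, starting from history rev
def pvRev : List Int → List (Int × Int) → List (Int × Int)
  | [], rev => rev
  | x :: xs, rev => pvRev xs ((x, pvStep rev x) :: rev)

-- chain values of xs in processing order, given starting history rev
def pvChains : List Int → List (Int × Int) → List Int
  | [], _ => []
  | x :: xs, rev => pvStep rev x :: pvChains xs ((x, pvStep rev x) :: rev)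

-- B's stack as a function of the reversed history
def pvFilt : List (Int × Int) → List (Int × Int)
  | [] => []
  | p :: r => p :: (pvFilt r).dropWhile (fun q => decide (p.1 ≤ q.1))

theorem pvRev_map_fst : ∀ (xs : List Int) (rev : List (Int × Int)),
    (pvRev xs rev).map Prod.fst = xs.reverse ++ rev.map Prod.fst := by
  intro xs
  induction xs with
  | nil => intro rev; simp [pvRev]
  | cons x xs ih => intro rev; simp [pvRev, ih]

theorem pvRev_length (xs : List Int) (rev : List (Int × Int)) :
    (pvRev xs rev).length = xs.length + rev.length := by
  have h := congrArg List.length (pvRev_map_fst xs rev)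
  simpa using h

theorem pvRev_append_singleton : ∀ (xs : List Int) (rev : List (Int × Int)) (y : Int),
    pvRev (xs ++ [y]) rev = (y, pvStep (pvRev xs rev) y) :: pvRev xs rev := by
  intro xs
  induction xs with
  | nil => intro rev y; simp [pvRev]
  | cons x xs ih => intro rev y; simp [pvRev, ih]

theorem pvRev_snd_eq : ∀ (xs : List Int) (rev : List (Int × Int)),
    (pvRev xs rev).reverse.map Prod.snd = rev.reverse.map Prod.snd ++ pvChains xs rev := by
  intro xs
  induction xs with
  | nil => intro rev; simp [pvRev, pvChains]
  | cons x xs ih => intro rev; simp [pvRev, pvChains, ih]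

-- A's inner loop = find the first j with arr[j] < arr[i], then one set
theorem pvInnerA_eq_find (arr : List Int) (i : Int) : ∀ (dp : List Int) (js : List Int),
    pvInnerA arr i dp js =
      match js.find? (fun j => decide (PySem.List.pyGetD arr j 0 < PySem.List.pyGetD arr i 0)) with
      | some j => PySem.List.pySetD dp i (PySem.List.pyGetD dp j 0 + 1)
      | none => dp := by
  intro dp js
  induction js with
  | nil => simp [pvInnerA]
  | cons j js ih =>
    by_cases h : PySem.List.pyGetD arr j 0 < PySem.List.pyGetD arr i 0
    · simp [pvInnerA, h, List.find?]
    · simp [pvInnerA, h, List.find?, ih]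

theorem pvGetD_append_length (pre rest : List Int) (y : Int) :
    PySem.List.pyGetD (pre ++ y :: rest) (pre.length : Int) 0 = y := by
  rw [PySem.List.pyGetD, PySem.List.pyGet?_append_length]; rfl

theorem pvSetD_append (pre rest : List Int) (y v : Int) :
    PySem.List.pySetD (pre ++ y :: rest) (pre.length : Int) v = pre ++ v :: rest := by
  have h1 : PySem.List.pyIdx? (pre ++ y :: rest).length (pre.length : Int) = some pre.length := by
    simp [PySem.List.pyIdx?]
  have h2 : (pre ++ y :: rest).set pre.length v = pre ++ v :: rest := by
    induction pre with
    | nil => simp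
    | cons a pre _ => simp
  simp only [PySem.List.pySetD, PySem.List.pySet?, h1, Option.map_some, Option.getD_some, h2]

-- the downward index scan over the reversed history, as a find? on the pairs
theorem pvDescend (x : Int) : ∀ (Q : List (Int × Int)) (restA restD : List Int),
    ((PySem.List.pyRange ((Q.length : Int) - 1) (-1) (-1)).find?
        (fun j => decide (PySem.List.pyGetD (Q.reverse.map Prod.fst ++ restA) j 0 < x))).map
        (fun j => PySem.List.pyGetD (Q.reverse.map Prod.snd ++ restD) j 0)
    = (Q.find? (fun p => decide (p.1 < x))).map Prod.snd := by
  intro Q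
  induction Q with
  | nil =>
    intro restA restD
    rw [PySem.List.pyRange_neg_one_eq_nil (by simp)]
    simp
  | cons p Q ih =>
    intro restA restD
    have hlen : ((p :: Q).length : Int) - 1 = (Q.length : Int) := by simp
    rw [hlen, PySem.List.pyRange_neg_one_cons (by omega)]
    have hA : (p :: Q).reverse.map Prod.fst ++ restA
        = (Q.reverse.map Prod.fst) ++ (p.1 :: restA) := by simp
    have hD : (p :: Q).reverse.map Prod.snd ++ restD
        = (Q.reverse.map Prod.snd) ++ (p.2 :: restD) := by simp
    have hlen2 : ((Q.reverse.map Prod.fst).length : Int) = (Q.length : Int) := by simp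
    have hget : PySem.List.pyGetD ((p :: Q).reverse.map Prod.fst ++ restA) (Q.length : Int) 0 = p.1 := by
      rw [hA, ← hlen2, pvGetD_append_length]
    have hgetD : PySem.List.pyGetD ((p :: Q).reverse.map Prod.snd ++ restD) (Q.length : Int) 0 = p.2 := by
      have hlen3 : ((Q.reverse.map Prod.snd).length : Int) = (Q.length : Int) := by simp
      rw [hD, ← hlen3, pvGetD_append_length]
    by_cases hx : p.1 < x
    · simp [List.find?, hx]
    · rw [List.find?]
      simp only [hget, hx, decide_false]
      rw [List.find?]
      simp only [hx, decide_false]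
      rw [hA, hD]
      exact ih (p.1 :: restA) (p.2 :: restD)

-- A's outer loop invariant
theorem pvAInv (arr : List Int) : ∀ (rest pfx : List Int), arr = pfx ++ rest →
    (PySem.List.pyRange (pfx.length : Int) (arr.length : Int) 1).foldl
        (fun dp i => pvInnerA arr i dp (PySem.List.pyRange (i - 1) (-1) (-1)))
        ((pvRev pfx []).reverse.map Prod.snd ++ List.replicate rest.length 1)
    = (pvRev arr []).reverse.map Prod.snd := by
  intro rest
  induction rest with
  | nil =>
    intro pfx harr
    rw [PySem.List.pyRange_one_eq_nil (by simp [harr])]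
    simp [harr]
  | cons xx rest ih =>
    intro pfx harr
    subst harr
    have hQf : (pvRev pfx []).reverse.map Prod.fst = pfx := by
      rw [List.map_reverse, pvRev_map_fst]; simp
    have hQl : (pvRev pfx []).length = pfx.length := by
      have := pvRev_length pfx []; simpa using this
    have hQsl : ((pvRev pfx []).reverse.map Prod.snd).length = pfx.length := by
      simp [hQl]
    have hgetT : PySem.List.pyGetD (pfx ++ xx :: rest) ((pfx.length : Int)) 0 = xx :=
      pvGetD_append_length pfx rest xx
    have hdesc := pvDescend xx (pvRev pfx []) (xx :: rest) (1 :: List.replicate rest.length 1)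
    rw [hQl, hQf] at hdesc
    have hlen1 : ((pfx.length : Int)) < (((pfx ++ xx :: rest).length : Int)) := by
      simp
    rw [PySem.List.pyRange_one_cons hlen1, List.foldl_cons, pvInnerA_eq_find]
    simp only [hgetT, List.length_cons, List.replicate_succ]
    have hstepEq : (match (PySem.List.pyRange ((pfx.length : Int) - 1) (-1) (-1)).find?
          (fun j => decide (PySem.List.pyGetD (pfx ++ xx :: rest) j 0 < xx)) with
        | some j => PySem.List.pySetD
            ((pvRev pfx []).reverse.map Prod.snd ++ 1 :: List.replicate rest.length 1)
            ((pfx.length : Int))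
            (PySem.List.pyGetD ((pvRev pfx []).reverse.map Prod.snd ++ 1 :: List.replicate rest.length 1) j 0 + 1)
        | none => (pvRev pfx []).reverse.map Prod.snd ++ 1 :: List.replicate rest.length 1)
        = (pvRev (pfx ++ [xx]) []).reverse.map Prod.snd ++ List.replicate rest.length 1 := by
      cases hfind : (pvRev pfx []).find? (fun p => decide (p.1 < xx)) with
      | none =>
        rw [hfind] at hdesc
        simp only [Option.map_none] at hdesc
        rw [Option.map_eq_none_iff] at hdesc
        rw [hdesc]
        rw [pvRev_append_singleton]
        have hc : pvStep (pvRev pfx []) xx = 1 := by simp [pvStep, hfind]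
        simp [hc]
      | some p =>
        rw [hfind] at hdesc
        simp only [Option.map_some] at hdesc
        obtain ⟨j, hj1, hj2⟩ := Option.map_eq_some_iff.mp hdesc
        rw [hj1]
        simp only [hj2]
        rw [← hQsl, pvSetD_append]
        rw [pvRev_append_singleton]
        have hc : pvStep (pvRev pfx []) xx = p.2 + 1 := by simp [pvStep, hfind]
        simp [hc]
    rw [hstepEq]
    have hih := ih (pfx ++ [xx]) (by simp)
    have hl2 : (((pfx ++ [xx]).length : Int)) = (pfx.length : Int) + 1 := by simp
    rw [hl2] at hih
    exact hih

-- B's chain computation matches pvStep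
theorem pvFindDropWhile : ∀ (l : List (Int × Int)) (q pr : (Int × Int) → Bool),
    (∀ a, q a = true → pr a = false) → (l.dropWhile q).find? pr = l.find? pr := by
  intro l
  induction l with
  | nil => intro q pr h; simp
  | cons a l ih =>
    intro q pr h
    by_cases hq : q a = true
    · rw [List.dropWhile_cons_of_pos hq, List.find?]
      simp [h a hq, ih q pr h]
    · rw [List.dropWhile_cons_of_neg (by simpa using hq)]

theorem pvFiltFind : ∀ (rev : List (Int × Int)) (x : Int),
    (pvFilt rev).find? (fun p => decide (p.1 < x)) = rev.find? (fun p => decide (p.1 < x)) := by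
  intro rev
  induction rev with
  | nil => intro x; simp [pvFilt]
  | cons p r ih =>
    intro x
    by_cases hx : p.1 < x
    · simp [pvFilt, List.find?, hx]
    · rw [pvFilt, List.find?, List.find?]
      simp only [hx, decide_false]
      rw [pvFindDropWhile _ _ _ (by intro a ha; simp at ha ⊢; omega), ih x]

-- B's loop invariant
theorem pvBInv : ∀ (xs : List Int) (rev : List (Int × Int)) (best : Int),
    xs.foldl pvStepB (best, pvFilt rev) =
      ((pvChains xs rev).foldl (fun b c => if b < c then c else b) best, pvFilt (pvRev xs rev)) := by
  intro xs
  induction xs with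
  | nil => intro rev best; simp [pvChains, pvRev]
  | cons x xs ih =>
    intro rev best
    have hchain : (match (pvFilt rev).dropWhile (fun p => decide (x ≤ p.1)) with
        | [] => (1 : Int) | p :: _ => p.2 + 1) = pvStep rev x := by
      have hpred : (fun (p : Int × Int) => !decide (p.1 < x)) = (fun p => decide (x ≤ p.1)) := by
        funext p
        by_cases h : p.1 < x
        · simp [h, show ¬ x ≤ p.1 by omega]
        · simp [h, show x ≤ p.1 by omega]
      have h := (List.find?_eq_head?_dropWhile_not (fun (p : Int × Int) => decide (p.1 < x)) (pvFilt rev)).symm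
      rw [hpred] at h
      rw [pvFiltFind] at h
      unfold pvStep
      cases hd : (pvFilt rev).dropWhile (fun p => decide (x ≤ p.1)) with
      | nil => rw [hd] at h; simp at h; rw [← h]
      | cons p s => rw [hd] at h; simp at h; rw [← h]
    have hstep : pvStepB (best, pvFilt rev) x =
        (if best < pvStep rev x then pvStep rev x else best, pvFilt ((x, pvStep rev x) :: rev)) := by
      rw [pvStepB]
      simp only [hchain, pvFilt]
    rw [List.foldl_cons, hstep, ih, pvChains, pvRev, List.foldl_cons]

-- ===== VERDICT (by name: the statement is the Claim_ definition above) =====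
theorem pvFoldMax : ∀ (l : List Int) (b : Int),
    l.foldl (fun b c => if b < c then c else b) b = l.foldl max b := by
  have hfun : (fun (b c : Int) => if b < c then c else b) = max := by
    funext b c; omega
  intro l b; rw [hfun]

theorem longest_subarr_spec : Claim_equal_longest_subarr := by
  intro arr _ hpre
  unfold Spec_longest_subarr
  cases arr with
  | nil => exact absurd rfl hpre
  | cons a rest =>
    have hstart : (pvRev [a] []).reverse.map Prod.snd ++ List.replicate rest.length 1
        = List.replicate (a :: rest).length 1 := by
      simp [pvRev, pvStep, List.replicate_succ]
    have hinv := pvAInv (a :: rest) rest [a] rfl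
    have h1 : ((([a] : List Int)).length : Int) = 1 := by simp
    rw [h1] at hinv
    have hs0 : pvStep [] a = 1 := by simp [pvStep]
    unfold longest_subarr longest_subarr_alt
    simp only [PySem.List.len_eq]
    rw [← hstart, hinv, pvRev_snd_eq]
    simp only [List.reverse_nil, List.map_nil, List.nil_append]
    rw [show ([] : List (Int × Int)) = pvFilt [] from rfl, pvBInv]
    simp only [show pvFilt ([] : List (Int × Int)) = [] from rfl]
    simp only [pvChains, hs0]
    rw [PySem.List.max?_id_cons, List.foldl_cons, pvFoldMax]
    norm_num
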